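-- pv_equiv track=rewrite | github.com/codingvarun/dsa-solutions | specialSubarray.py | specialSubarray
-- ===== SOURCE A (Python) =====
-- from typing import List
--
-- def specialSubarray(n: int, arr: List[int]) -> List[int]:
--     # write your code here
--     freqs = {0:set({})}
--     itemfqs = dict()
--     for i in range(n):
--         freqs.get(itemfqs.get(arr[i],0),set({})).discard(arr[i])
--         itemfqs[arr[i]] = itemfqs.get(arr[i],0) + 1
--         freqs[itemfqs.get(arr[i],1)]=freqs.get(itemfqs.get(arr[i],1),set({}))
--         freqs[itemfqs.get(arr[i],1)].add(arr[i])
--     modefq = max(freqs)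
--     if modefq==1:
--         return arr[:1]
--     else:
--         modes = freqs[modefq]
--         smallestcont = arr
--         for m in modes:
--             start = -1
--             end = -1
--             tempmodefq = modefq
--             for i in range(n):
--                 if start == -1:
--                     if arr[i] == m:
--                         start = i
--                         end = i
--                         tempmodefq-=1
--                 elif not tempmodefq==0 and start>=0:
--                     end+=1
--                     if arr[i]==m:
--                         tempmodefq-=1
--             if end-start+1<len(smallestcont):
--                 smallestcont = arr[start:end+1]
--     return smallestcont
-- ===== SOURCE B (Python) =====
-- from typing import List
--
-- def specialSubarray(n: int, arr: List[int]) -> List[int]: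
--     # One pass recording count / first index / last index per value,
--     # then one pass over the distinct values to pick the shortest mode span.
--     counts = {}
--     first = {}
--     last = {}
--     for i in range(n):
--         v = arr[i]
--         if v not in counts:
--             counts[v] = 0
--             first[v] = i
--         counts[v] = counts[v] + 1
--         last[v] = i
--     m = max(counts.values(), default=0)
--     if m == 0:
--         # no elements were scanned: nothing restricts the answer
--         return arr
--     if m == 1:
--         return arr[:1]
--     best = None
--     for v, c in counts.items():
--         if c == m:
--             if best is None or last[v] - first[v] < best[1] - best[0]:
--                 best = (first[v], last[v])
--     return arr[best[0]:best[1] + 1]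
-- ===== Notes on version B (the rewrite author's own statement) =====
-- stated objective: alternative
-- what changed: B replaces A's frequency-bucket dict-of-sets plus a full rescan of the array per mode with a single pass recording count/first-index/last-index per value followed by one pass over the distinct values, so the per-mode rescans disappear.
-- outside the precondition, e.g. on specialSubarray(4, [2, 1, 2, 1]): A returns [1, 2, 1], B returns [2, 1, 2]; on specialSubarray(5, [1, 2]): A raises IndexError, B raises IndexError
import Mathlib
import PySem

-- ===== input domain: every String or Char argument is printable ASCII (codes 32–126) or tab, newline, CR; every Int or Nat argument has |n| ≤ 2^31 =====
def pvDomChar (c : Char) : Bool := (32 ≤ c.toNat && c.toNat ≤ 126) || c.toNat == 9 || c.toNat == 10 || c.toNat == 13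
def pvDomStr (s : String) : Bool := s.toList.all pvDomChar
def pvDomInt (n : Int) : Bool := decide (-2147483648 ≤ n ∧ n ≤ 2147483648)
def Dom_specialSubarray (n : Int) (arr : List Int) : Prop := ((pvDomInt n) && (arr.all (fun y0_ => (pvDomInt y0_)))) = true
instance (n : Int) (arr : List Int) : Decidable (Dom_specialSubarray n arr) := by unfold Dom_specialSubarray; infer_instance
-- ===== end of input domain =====

-- B records count/first/last per value in ONE pass and then scans the distinct values once,
-- replacing A's frequency-bucket dict-of-sets plus a full rescan of the array per mode.

-- ===== PORT A =====
-- Literal transliteration of A.  Python's '.discard' on the set fetched with 'freqs.get(k, set())'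
-- mutates the stored set only when the key is present, hence the 'contains' guard.
-- The final 'for m in modes' iterates a Python set; its hash order is not modelled: under
-- Pre_ (no span tie between distinct modes) the fold's result does not depend on that order.
def specialSubarray (n : Int) (arr : List Int) : List Int :=
  let st := (PySem.List.pyRange 0 n 1).foldl
    (fun (st : PySem.Dict Int (PySem.Set Int) × PySem.Dict Int Int) i =>
      let freqs := st.1
      let itemfqs := st.2
      let a := PySem.List.pyGetD arr i 0
      let k0 := itemfqs.getD a 0
      let freqs := if freqs.contains k0 then freqs.modify k0 PySem.Set.empty (fun s => PySem.Set.discard s a) else freqs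
      let itemfqs := itemfqs.insert a (itemfqs.getD a 0 + 1)
      let c := itemfqs.getD a 1
      let freqs := freqs.insert c (freqs.getD c PySem.Set.empty)
      let freqs := freqs.modify c PySem.Set.empty (fun s => PySem.Set.add s a)
      (freqs, itemfqs))
    ((PySem.Dict.empty.insert 0 PySem.Set.empty : PySem.Dict Int (PySem.Set Int)), (PySem.Dict.empty : PySem.Dict Int Int))
  let freqs := st.1
  let modefq := (PySem.List.max? freqs.keys (fun x => x)).getD 0
  if modefq = 1 then PySem.List.slice arr none (some 1)
  else
    let modes := freqs.getD modefq PySem.Set.empty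
    modes.foldl (fun (smallestcont : List Int) m =>
      let se := (PySem.List.pyRange 0 n 1).foldl
        (fun (st : Int × Int × Int) i =>
          let start := st.1
          let e := st.2.1
          let tmf := st.2.2
          if start = -1 then
            (if PySem.List.pyGetD arr i 0 = m then (i, i, tmf - 1) else (start, e, tmf))
          else if ¬ tmf = 0 ∧ start ≥ 0 then
            (if PySem.List.pyGetD arr i 0 = m then (start, e + 1, tmf - 1) else (start, e + 1, tmf))
          else (start, e, tmf))
        (-1, -1, modefq)
      if se.2.1 - se.1 + 1 < (smallestcont.length : Int) then PySem.List.slice arr (some se.1) (some (se.2.1 + 1))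
      else smallestcont) arr

-- ===== PORT B =====
def specialSubarray_alt (n : Int) (arr : List Int) : List Int :=
  let st := (PySem.List.pyRange 0 n 1).foldl
    (fun (st : PySem.Dict Int Int × PySem.Dict Int Int × PySem.Dict Int Int) i =>
      let counts := st.1
      let first := st.2.1
      let last := st.2.2
      let v := PySem.List.pyGetD arr i 0
      let cf := if counts.contains v then (counts, first) else (counts.insert v 0, first.insert v i)
      (cf.1.insert v (cf.1.getD v 0 + 1), cf.2, last.insert v i))
    (PySem.Dict.empty, PySem.Dict.empty, PySem.Dict.empty)
  let counts := st.1
  let first := st.2.1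
  let last := st.2.2
  let m := PySem.List.maxD counts.values (fun x => x) 0
  if m = 0 then arr
  else if m = 1 then PySem.List.slice arr none (some 1)
  else
    let best := counts.items.foldl
      (fun (best : Option (Int × Int)) p =>
        if p.2 = m then
          match best with
          | none => some (first.getD p.1 0, last.getD p.1 0)
          | some b => if last.getD p.1 0 - first.getD p.1 0 < b.2 - b.1 then some (first.getD p.1 0, last.getD p.1 0) else best
        else best) none
    match best with
    | none => []   -- unreachable: m ≥ 2 is the maximum of counts.values, so some entry matches
    | some b => PySem.List.slice arr (some b.1) (some (b.2 + 1))

-- ===== PRECONDITION & SPEC =====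
-- Helpers Pre_/D_ are phrased with: the scanned prefix, the max frequency, first/last index and span of a value.
def pvPrefix (n : Int) (arr : List Int) : List Int := arr.take n.toNat
def pvM (p : List Int) : Int := (PySem.List.max? (p.map (fun v => (p.count v : Int))) (fun x => x)).getD 0
def pvS (p : List Int) (v : Int) : Nat := p.idxOf v
def pvL (p : List Int) (v : Int) : Nat := p.length - 1 - p.reverse.idxOf v
def pvSpan (p : List Int) (v : Int) : Int := (pvL p v : Int) - (pvS p v : Int) + 1

-- Pre_ excludes n > len(arr), on which A raises IndexError, and inputs where two DISTINCT modes tie on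
-- the MINIMAL span length, on which A's choice follows Python's set hash order (accidental; see cites).
def Pre_specialSubarray (n : Int) (arr : List Int) : Prop :=
  n ≤ (arr.length : Int) ∧
  (2 ≤ pvM (pvPrefix n arr) →
    ∀ v ∈ pvPrefix n arr, ∀ w ∈ pvPrefix n arr,
      ((pvPrefix n arr).count v : Int) = pvM (pvPrefix n arr) →
      ((pvPrefix n arr).count w : Int) = pvM (pvPrefix n arr) →
      pvSpan (pvPrefix n arr) v = pvSpan (pvPrefix n arr) w →
      (∀ x ∈ pvPrefix n arr, ((pvPrefix n arr).count x : Int) = pvM (pvPrefix n arr) →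
        pvSpan (pvPrefix n arr) v ≤ pvSpan (pvPrefix n arr) x) → v = w)
instance (n : Int) (arr : List Int) : Decidable (Pre_specialSubarray n arr) := by unfold Pre_specialSubarray; infer_instance

def pvWitness_specialSubarray : Int × List Int := (5, [7, 7, 2, 7, 2])

def Spec_specialSubarray (n : Int) (arr : List Int) (out : List Int) : Prop :=
  out = specialSubarray_alt n arr
instance (n : Int) (arr : List Int) (out : List Int) : Decidable (Spec_specialSubarray n arr out) := by unfold Spec_specialSubarray; infer_instance

-- ===== CLAIM (what is proved, stated in full; the proofs are below) =====
def Claim_equal_specialSubarray : Prop := ∀ (n : Int) (arr : List Int), Dom_specialSubarray n arr → Pre_specialSubarray n arr → Spec_specialSubarray n arr (specialSubarray n arr)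

-- ===== LEMMAS AND PROOFS =====

-- ---- proof-side named copies of the two loop bodies (definitionally equal to the ports' lambdas) ----

def pvA1 (st : PySem.Dict Int (PySem.Set Int) × PySem.Dict Int Int) (a : Int) :
    PySem.Dict Int (PySem.Set Int) × PySem.Dict Int Int :=
  let freqs := st.1
  let itemfqs := st.2
  let k0 := itemfqs.getD a 0
  let freqs := if freqs.contains k0 then freqs.modify k0 PySem.Set.empty (fun s => PySem.Set.discard s a) else freqs
  let itemfqs := itemfqs.insert a (itemfqs.getD a 0 + 1)
  let c := itemfqs.getD a 1
  let freqs := freqs.insert c (freqs.getD c PySem.Set.empty)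
  let freqs := freqs.modify c PySem.Set.empty (fun s => PySem.Set.add s a)
  (freqs, itemfqs)

def pvAInit : PySem.Dict Int (PySem.Set Int) × PySem.Dict Int Int :=
  ((PySem.Dict.empty.insert 0 PySem.Set.empty : PySem.Dict Int (PySem.Set Int)), (PySem.Dict.empty : PySem.Dict Int Int))

def pvScanStep (m : Int) (st : Int × Int × Int) (i : Int) (v : Int) : Int × Int × Int :=
  if st.1 = -1 then
    (if v = m then (i, i, st.2.2 - 1) else (st.1, st.2.1, st.2.2))
  else if ¬ st.2.2 = 0 ∧ st.1 ≥ 0 then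
    (if v = m then (st.1, st.2.1 + 1, st.2.2 - 1) else (st.1, st.2.1 + 1, st.2.2))
  else (st.1, st.2.1, st.2.2)

def pvAImpl (n : Int) (arr : List Int) : List Int :=
  let st := (PySem.List.pyRange 0 n 1).foldl (fun st i => pvA1 st (PySem.List.pyGetD arr i 0)) pvAInit
  let freqs := st.1
  let modefq := (PySem.List.max? freqs.keys (fun x => x)).getD 0
  if modefq = 1 then PySem.List.slice arr none (some 1)
  else
    let modes := freqs.getD modefq PySem.Set.empty
    modes.foldl (fun (smallestcont : List Int) m =>
      let se := (PySem.List.pyRange 0 n 1).foldl (fun st i => pvScanStep m st i (PySem.List.pyGetD arr i 0)) (-1, -1, modefq)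
      if se.2.1 - se.1 + 1 < (smallestcont.length : Int) then PySem.List.slice arr (some se.1) (some (se.2.1 + 1))
      else smallestcont) arr

lemma pvA_eq_impl (n : Int) (arr : List Int) : specialSubarray n arr = pvAImpl n arr := rfl

def pvB1 (st : PySem.Dict Int Int × PySem.Dict Int Int × PySem.Dict Int Int) (i : Int) (v : Int) :
    PySem.Dict Int Int × PySem.Dict Int Int × PySem.Dict Int Int :=
  let cf := if st.1.contains v then (st.1, st.2.1) else (st.1.insert v 0, st.2.1.insert v i)
  (cf.1.insert v (cf.1.getD v 0 + 1), cf.2, st.2.2.insert v i)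

def pvBImpl (n : Int) (arr : List Int) : List Int :=
  let st := (PySem.List.pyRange 0 n 1).foldl (fun st i => pvB1 st i (PySem.List.pyGetD arr i 0)) (PySem.Dict.empty, PySem.Dict.empty, PySem.Dict.empty)
  let counts := st.1
  let first := st.2.1
  let last := st.2.2
  let m := PySem.List.maxD counts.values (fun x => x) 0
  if m = 0 then arr
  else if m = 1 then PySem.List.slice arr none (some 1)
  else
    let best := counts.items.foldl
      (fun (best : Option (Int × Int)) p =>
        if p.2 = m then
          match best with
          | none => some (first.getD p.1 0, last.getD p.1 0)
          | some b => if last.getD p.1 0 - first.getD p.1 0 < b.2 - b.1 then some (first.getD p.1 0, last.getD p.1 0) else best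
        else best) none
    match best with
    | none => []
    | some b => PySem.List.slice arr (some b.1) (some (b.2 + 1))

lemma pvB_eq_impl (n : Int) (arr : List Int) : specialSubarray_alt n arr = pvBImpl n arr := rfl

-- ---- generic loop-shape conversion ----

lemma pv_enum_snd_foldl {β : Type} (q : List Int) (g : β → Int → β) (b0 : β) :
    (PySem.List.enumerate q 0).foldl (fun b iv => g b iv.2) b0 = q.foldl g b0 := by
  conv_rhs => rw [← PySem.List.map_snd_enumerate q 0]
  rw [List.foldl_map]

lemma pvPrefix_length {n : Int} (arr : List Int) (hn : 0 ≤ n) (hlen : n ≤ (arr.length : Int)) :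
    ((pvPrefix n arr).length : Int) = n := by
  simp only [pvPrefix, List.length_take]
  omega

lemma pv_foldl_enum {β : Type} (n : Int) (arr : List Int) (hn : 0 ≤ n) (hlen : n ≤ (arr.length : Int))
    (F : β → Int → Int → β) (init : β) :
    (PySem.List.pyRange 0 n 1).foldl (fun acc i => F acc i (PySem.List.pyGetD arr i 0)) init
      = (PySem.List.enumerate (pvPrefix n arr) 0).foldl (fun acc iv => F acc iv.1 iv.2) init := by
  rw [PySem.List.enumerate_eq_map_pyRange (pvPrefix n arr) 0, List.foldl_map]
  rw [PySem.List.len_eq, pvPrefix_length arr hn hlen]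
  apply PySem.List.foldl_congr_mem
  intro acc i hi
  rw [PySem.List.mem_pyRange_one] at hi
  have h0 : (0:Int) ≤ i := hi.1
  rw [PySem.List.pyGetD_of_nonneg _ _ h0, PySem.List.pyGetD_of_nonneg _ _ h0]
  have hlt : i.toNat < n.toNat := by omega
  simp only [pvPrefix, List.getD_eq_getElem?_getD, List.getElem?_take]
  simp [hlt]

-- ---- first/last occurrence helpers ----

lemma pv_idxOf_le {l : List Int} {x : Int} {j : Nat} (hj : j < l.length) (h : l[j] = x) :
    l.idxOf x ≤ j := by
  induction l generalizing j with
  | nil => simp at hj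
  | cons a t ih =>
    by_cases hax : a = x
    · simp [hax, List.idxOf_cons_self]
    · cases j with
      | zero => simp at h; exact absurd h hax
      | succ j =>
        have := ih (by simpa using hj) (by simpa using h)
        simp [hax]
        omega

lemma pvL_lt {p : List Int} {x : Int} (hx : x ∈ p) : pvL p x < p.length := by
  have h1 : 0 < p.length := List.length_pos_of_mem hx
  simp only [pvL]
  omega

lemma pvS_le_pvL {p : List Int} {x : Int} (hx : x ∈ p) : pvS p x ≤ pvL p x := by
  have hxr : x ∈ p.reverse := by simpa using hx
  have hr : p.reverse.idxOf x < p.reverse.length := List.idxOf_lt_length_iff.mpr hxr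
  have hrl : p.reverse.idxOf x < p.length := by simpa using hr
  have hget : p.reverse[p.reverse.idxOf x] = x := List.getElem_idxOf hr
  rw [List.getElem_reverse] at hget
  have hle := pv_idxOf_le (l := p) (j := p.length - 1 - p.reverse.idxOf x) (by omega) hget
  simp only [pvS, pvL]
  omega

lemma pvL_append_self (q : List Int) (v : Int) : pvL (q ++ [v]) v = q.length := by
  simp only [pvL, List.reverse_append, List.reverse_cons, List.reverse_nil, List.nil_append,
    List.cons_append, List.nil_append, List.idxOf_cons_self, List.length_append]
  simp

lemma pvL_append_ne {q : List Int} {v w : Int} (hw : w ∈ q) (hne : w ≠ v) :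
    pvL (q ++ [v]) w = pvL q w := by
  have hwr : w ∈ q.reverse := by simpa using hw
  have hr : q.reverse.idxOf w < q.length := by
    have := List.idxOf_lt_length_iff.mpr hwr; simpa using this
  simp only [pvL, List.reverse_append, List.reverse_cons, List.reverse_nil, List.nil_append,
    List.cons_append, List.nil_append, List.length_append]
  rw [List.idxOf_cons, show ((v == w) = false) by simp [hne.symm]]
  simp only [cond_false, List.length_singleton]
  omega

lemma pvS_append {q : List Int} {w : Int} (v : Int) (hw : w ∈ q) :
    (q ++ [v]).idxOf w = q.idxOf w := by
  rw [List.idxOf_append]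
  simp [hw]

lemma pvS_append_self {q : List Int} {v : Int} (hv : v ∉ q) :
    (q ++ [v]).idxOf v = q.length := by
  rw [List.idxOf_append]
  simp [hv, List.idxOf_cons_self]

-- ---- the maximal frequency pvM ----

lemma pvM_spec {p : List Int} (hp : p ≠ []) :
    (∃ x ∈ p, (p.count x : Int) = pvM p) ∧ (∀ x ∈ p, (p.count x : Int) ≤ pvM p) := by
  have hmapne : p.map (fun v => (p.count v : Int)) ≠ [] := by simpa using hp
  rcases hmax : PySem.List.max? (p.map (fun v => (p.count v : Int))) (fun x => x) with _ | m
  · rw [PySem.List.max?_eq_none_iff] at hmax; exact absurd hmax hmapne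
  · have hmem := PySem.List.max?_mem hmax
    have hub := PySem.List.max?_isMax hmax
    rcases List.mem_map.mp hmem with ⟨x, hx, hxe⟩
    constructor
    · exact ⟨x, hx, by simp [pvM, hmax, hxe]⟩
    · intro y hy
      have := hub _ (List.mem_map.mpr ⟨y, hy, rfl⟩)
      simpa [pvM, hmax] using this

lemma pvM_pos {p : List Int} (hp : p ≠ []) : 1 ≤ pvM p := by
  obtain ⟨⟨x, hx, he⟩, -⟩ := pvM_spec hp
  have : 0 < p.count x := List.count_pos_iff.mpr hx
  omega


-- ---- invariant of A's counting loop ----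

def pvInvA (q : List Int) (st : PySem.Dict Int (PySem.Set Int) × PySem.Dict Int Int) : Prop :=
  st.2 = PySem.Dict.counter q ∧
  st.1.getD 0 PySem.Set.empty = [] ∧
  (∀ k : Int, 1 ≤ k → ∀ x : Int, (x ∈ st.1.getD k PySem.Set.empty ↔ (q.count x : Int) = k)) ∧
  (∀ k : Int, (st.1.getD k PySem.Set.empty).Nodup) ∧
  (0:Int) ∈ st.1.keys ∧
  (∀ k ∈ st.1.keys, k = 0 ∨ ∃ x ∈ q, k ≤ (q.count x : Int)) ∧
  (∀ x ∈ q, ((q.count x : Int)) ∈ st.1.keys)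

lemma pvInvA_init : pvInvA [] pvAInit := by
  refine ⟨rfl, ?_, ?_, ?_, ?_, ?_, ?_⟩
  · simp [pvAInit, PySem.Dict.getD_insert_self]
  · intro k hk x
    rw [show pvAInit.1 = PySem.Dict.empty.insert 0 PySem.Set.empty from rfl]
    rw [PySem.Dict.getD_insert_of_ne _ _ _ (by omega : k ≠ 0), PySem.Dict.getD_empty]
    simp [PySem.Set.empty]
    omega
  · intro k
    rw [show pvAInit.1 = PySem.Dict.empty.insert 0 PySem.Set.empty from rfl]
    by_cases hk : k = 0
    · subst hk; rw [PySem.Dict.getD_insert_self]; exact List.nodup_nil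
    · rw [PySem.Dict.getD_insert_of_ne _ _ _ hk, PySem.Dict.getD_empty]; exact List.nodup_nil
  · rw [show pvAInit.1 = PySem.Dict.empty.insert 0 PySem.Set.empty from rfl]
    rw [PySem.Dict.mem_keys_insert]
    left; rfl
  · intro k hk
    rw [show pvAInit.1 = PySem.Dict.empty.insert 0 PySem.Set.empty from rfl] at hk
    rw [PySem.Dict.mem_keys_insert] at hk
    rcases hk with h | h
    · exact Or.inl h
    · simp [PySem.Dict.keys_empty] at h
  · intro x hx; simp at hx

lemma pvInvA_step {q : List Int} {st : PySem.Dict Int (PySem.Set Int) × PySem.Dict Int Int}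
    (v : Int) (h : pvInvA q st) : pvInvA (q ++ [v]) (pvA1 st v) := by
  obtain ⟨f, it⟩ := st
  obtain ⟨hit, h0, hiff, hnd, h0k, hub, hatt⟩ := h
  simp only at hit h0 hiff hnd h0k hub hatt
  subst hit
  have hk0 : (PySem.Dict.counter q).getD v 0 = ((q.count v : Nat) : Int) := PySem.Dict.getD_counter q v
  have hcont : f.contains ((q.count v : Nat) : Int) = true := by
    rcases Nat.eq_zero_or_pos (q.count v) with hz | hpos
    · rw [hz]
      exact (PySem.Dict.contains_iff_mem_keys f 0).mpr (by exact_mod_cast h0k)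
    · exact (PySem.Dict.contains_iff_mem_keys f _).mpr (hatt v (List.count_pos_iff.mp hpos))
  have hctr : PySem.Dict.counter (q ++ [v]) = (PySem.Dict.counter q).insert v ((PySem.Dict.counter q).getD v 0 + 1) := by
    rw [← PySem.Dict.foldl_insert_getD_add_one_eq_counter, ← PySem.Dict.foldl_insert_getD_add_one_eq_counter,
      List.foldl_append]
    rfl
  -- the new freqs after the three dict operations
  set c0 : Int := ((q.count v : Nat) : Int) with hc0
  set f1 := f.modify c0 PySem.Set.empty (fun s => PySem.Set.discard s v) with hf1
  set f3 := (f1.insert (c0 + 1) (f1.getD (c0 + 1) PySem.Set.empty)).modify (c0 + 1) PySem.Set.empty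
      (fun s => PySem.Set.add s v) with hf3
  have himpl : pvA1 (f, PySem.Dict.counter q) v = (f3, PySem.Dict.counter (q ++ [v])) := by
    simp only [pvA1, hk0, hcont, if_true, hctr]
    rw [PySem.Dict.getD_insert_self, hf3, hf1]
  rw [himpl]
  have hgf1 : ∀ k : Int, f1.getD k PySem.Set.empty
      = if k = c0 then PySem.Set.discard (f.getD c0 PySem.Set.empty) v else f.getD k PySem.Set.empty := by
    intro k; rw [hf1, PySem.Dict.getD_modify]
  have hgf3 : ∀ k : Int, f3.getD k PySem.Set.empty
      = if k = c0 + 1 then PySem.Set.add (f1.getD (c0 + 1) PySem.Set.empty) v else f1.getD k PySem.Set.empty := by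
    intro k
    rw [hf3, PySem.Dict.getD_modify]
    by_cases hk : k = c0 + 1
    · simp [hk, PySem.Dict.getD_insert_self]
    · simp [hk]
      rw [PySem.Dict.getD_insert_of_ne _ _ _ hk]
  have hkeys3 : ∀ k : Int, (k ∈ f3.keys ↔ k = c0 + 1 ∨ k ∈ f.keys) := by
    intro k
    rw [hf3, PySem.Dict.keys_modify, PySem.Dict.mem_keys_insert, PySem.Dict.mem_keys_insert]
    rw [hf1, PySem.Dict.keys_modify, PySem.Dict.mem_keys_insert]
    constructor
    · rintro (h | h | h)
      · exact Or.inl h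
      · exact Or.inl h
      · rcases h with h | h
        · subst h; exact Or.inr ((PySem.Dict.contains_iff_mem_keys f c0).mp hcont)
        · exact Or.inr h
    · rintro (h | h)
      · exact Or.inl h
      · exact Or.inr (Or.inr (Or.inr h))
  have hcnt : ∀ x : Int, ((q ++ [v]).count x : Int) = (q.count x : Int) + (if x = v then 1 else 0) := by
    intro x
    by_cases hx : x = v
    · subst hx; simp [List.count_append]
    · simp [List.count_append, hx, Ne.symm hx]
  have hvmem : v ∈ q ++ [v] := by simp
  refine ⟨rfl, ?_, ?_, ?_, ?_, ?_, ?_⟩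
  · -- key 0 stays empty
    show f3.getD 0 PySem.Set.empty = []
    rw [hgf3, if_neg (by omega : (0:Int) ≠ c0 + 1), hgf1]
    by_cases h00 : (0:Int) = c0
    · rw [if_pos h00, ← h00, h0]; rfl
    · rw [if_neg h00]; exact h0
  · -- membership description of every bucket
    intro k hk x
    show x ∈ f3.getD k PySem.Set.empty ↔ _
    rw [hgf3]
    by_cases hkc : k = c0 + 1
    · subst hkc
      rw [if_pos rfl, PySem.Set.mem_add, hgf1, if_neg (by omega : c0 + 1 ≠ c0)]
      by_cases hxv : x = v
      · subst hxv
        rw [hcnt, if_pos rfl]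
        constructor
        · intro _; omega
        · intro _; exact Or.inr rfl
      · rw [hcnt, if_neg hxv]
        constructor
        · rintro (h | h)
          · have := (hiff (c0 + 1) (by omega) x).mp h
            omega
          · exact absurd h hxv
        · intro h
          exact Or.inl ((hiff (c0 + 1) (by omega) x).mpr (by omega))
    · rw [if_neg hkc, hgf1]
      by_cases hkc0 : k = c0
      · subst hkc0
        rw [if_pos rfl, PySem.Set.mem_discard, hiff c0 hk x, hcnt]
        by_cases hxv : x = v
        · subst hxv
          rw [if_pos rfl]
          constructor
          · rintro ⟨-, h⟩; exact absurd rfl h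
          · intro h; omega
        · rw [if_neg hxv]
          constructor
          · rintro ⟨h, -⟩; omega
          · intro h; exact ⟨by omega, hxv⟩
      · rw [if_neg hkc0, hiff k hk x, hcnt]
        by_cases hxv : x = v
        · subst hxv
          rw [if_pos rfl]
          constructor
          · intro h; omega
          · intro h; omega
        · rw [if_neg hxv]
          constructor
          · intro h; omega
          · intro h; omega
  · -- buckets stay duplicate-free
    intro k
    show (f3.getD k PySem.Set.empty).Nodup
    rw [hgf3]
    by_cases hkc : k = c0 + 1
    · rw [if_pos hkc]
      apply PySem.Set.nodup_add
      rw [hgf1, if_neg (by omega : c0 + 1 ≠ c0)]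
      exact hnd _
    · rw [if_neg hkc, hgf1]
      by_cases hkc0 : k = c0
      · rw [if_pos hkc0]; exact PySem.Set.nodup_discard _ _ (hnd _)
      · rw [if_neg hkc0]; exact hnd _
  · -- 0 is still a key
    exact (hkeys3 0).mpr (Or.inr h0k)
  · -- every key is bounded by some current count
    intro k hk
    rcases (hkeys3 k).mp hk with h | h
    · right
      exact ⟨v, hvmem, by rw [h, hcnt]; simp [hc0]⟩
    · rcases hub k h with h' | h'
      · exact Or.inl h'
      · rcases h' with ⟨x, hx, hxc⟩
        refine Or.inr ⟨x, by simp [hx], ?_⟩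
        rw [hcnt]
        by_cases hxv : x = v
        · subst hxv; rw [if_pos rfl]; omega
        · rw [if_neg hxv]; omega
  · -- every current count is a key
    intro x hx
    rw [hcnt]
    by_cases hxv : x = v
    · subst hxv
      rw [if_pos rfl]
      exact (hkeys3 _).mpr (Or.inl rfl)
    · rw [if_neg hxv]
      simp only [add_zero]
      rcases List.mem_append.mp hx with h | h
      · exact (hkeys3 _).mpr (Or.inr (hatt x h))
      · simp at h; exact absurd h hxv

lemma pvInvA_foldl (q : List Int) : pvInvA q (q.foldl pvA1 pvAInit) := by
  induction q using List.reverseRecOn with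
  | nil => exact pvInvA_init
  | append_singleton q v ih =>
    rw [List.foldl_append]
    exact pvInvA_step v ih


lemma pv_counter_snoc (q : List Int) (v : Int) :
    PySem.Dict.counter (q ++ [v]) = (PySem.Dict.counter q).insert v ((PySem.Dict.counter q).getD v 0 + 1) := by
  rw [← PySem.Dict.foldl_insert_getD_add_one_eq_counter, ← PySem.Dict.foldl_insert_getD_add_one_eq_counter,
    List.foldl_append]
  rfl

-- A's mode frequency is the maximal count of the scanned prefix
lemma pvA_modefq (p : List Int) (hp : p ≠ []) :
    (PySem.List.max? ((p.foldl pvA1 pvAInit).1.keys) (fun x => x)).getD 0 = pvM p := by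
  obtain ⟨-, -, -, -, h0k, hub, hatt⟩ := pvInvA_foldl p
  obtain ⟨⟨x0, hx0, hx0e⟩, hubM⟩ := pvM_spec hp
  have hkne : (p.foldl pvA1 pvAInit).1.keys ≠ [] := by
    intro h; rw [h] at h0k; simp at h0k
  rcases hmax : PySem.List.max? ((p.foldl pvA1 pvAInit).1.keys) (fun x => x) with _ | mk
  · rw [PySem.List.max?_eq_none_iff] at hmax; exact absurd hmax hkne
  · have hmem := PySem.List.max?_mem hmax
    have hisMax := PySem.List.max?_isMax hmax
    have h1 : mk ≤ pvM p := by
      rcases hub mk hmem with h | ⟨x, hx, hxc⟩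
      · have := pvM_pos hp; omega
      · exact le_trans hxc (hubM x hx)
    have h2 : pvM p ≤ mk := by
      have := hisMax _ (hx0e ▸ hatt x0 hx0)
      simpa using this
    simp only [Option.getD_some]
    omega

-- ---- invariant of A's per-mode scanning loop ----

def pvScanInv (M m : Int) (q : List Int) (st : Int × Int × Int) : Prop :=
  if q.count m = 0 then st = (-1, -1, M)
  else if ((q.count m : Nat) : Int) < M then st = ((q.idxOf m : Int), (q.length : Int) - 1, M - (q.count m : Int))
  else st = ((q.idxOf m : Int), (pvL q m : Int), 0)

lemma pvScan_step {M m : Int} {q : List Int} {v : Int} {st : Int × Int × Int}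
    (h : pvScanInv M m q st) (hub : (((q ++ [v]).count m : Nat) : Int) ≤ M) :
    pvScanInv M m (q ++ [v]) (pvScanStep m st ((q.length : Nat) : Int) v) := by
  have hcnt : (q ++ [v]).count m = q.count m + (if v = m then 1 else 0) := by
    by_cases hvm : v = m
    · subst hvm; simp [List.count_append]
    · simp [List.count_append, hvm]
  unfold pvScanInv at h ⊢
  by_cases h0 : q.count m = 0
  · rw [if_pos h0] at h
    subst h
    have hmq : m ∉ q := List.count_eq_zero.mp h0
    have hstep : pvScanStep m (-1, -1, M) ((q.length : Nat) : Int) v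
        = if v = m then (((q.length : Nat) : Int), ((q.length : Nat) : Int), M - 1) else (-1, -1, M) := by
      simp [pvScanStep]
    rw [hstep]
    by_cases hvm : v = m
    · subst hvm
      have hc1 : (q ++ [v]).count v = 1 := by rw [hcnt, h0, if_pos rfl]
      have hidx : (q ++ [v]).idxOf v = q.length := pvS_append_self hmq
      rw [if_pos rfl, if_neg (by omega : ¬ (q ++ [v]).count v = 0)]
      by_cases hM1 : (((q ++ [v]).count v : Nat) : Int) < M
      · rw [if_pos hM1, hidx]
        simp only [List.length_append, List.length_singleton, Prod.mk.injEq, hc1]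
        refine ⟨by trivial, by push_cast; omega, by push_cast; omega⟩
      · rw [if_neg hM1, hidx, pvL_append_self]
        rw [hc1] at hub hM1
        simp only [Prod.mk.injEq]
        refine ⟨by trivial, by trivial, by push_cast at hub hM1; omega⟩
    · rw [if_neg hvm]
      have hcz : (q ++ [v]).count m = 0 := by rw [hcnt, if_neg hvm, h0]
      rw [if_pos hcz]
  · rw [if_neg h0] at h
    have hm_mem : m ∈ q := List.count_pos_iff.mp (Nat.pos_of_ne_zero h0)
    have hmv_or : ∀ _ : ¬ v = m, (q ++ [v]).count m = q.count m := by
      intro hvm; rw [hcnt, if_neg hvm]; omega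
    by_cases hlt : ((q.count m : Nat) : Int) < M
    · rw [if_pos hlt] at h
      subst h
      have hstep : pvScanStep m ((q.idxOf m : Int), (q.length : Int) - 1, M - (q.count m : Int))
            ((q.length : Nat) : Int) v
          = if v = m then ((q.idxOf m : Int), (q.length : Int) - 1 + 1, M - (q.count m : Int) - 1)
            else ((q.idxOf m : Int), (q.length : Int) - 1 + 1, M - (q.count m : Int)) := by
        simp only [pvScanStep]
        rw [if_neg (by omega : ¬ ((q.idxOf m : Nat) : Int) = -1)]
        rw [if_pos ⟨by omega, by omega⟩]
      rw [hstep]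
      by_cases hvm : v = m
      · subst hvm
        have hc' : (q ++ [v]).count v = q.count v + 1 := by rw [hcnt, if_pos rfl]
        rw [if_pos rfl, if_neg (by omega : ¬ (q ++ [v]).count v = 0)]
        by_cases hlt' : (((q ++ [v]).count v : Nat) : Int) < M
        · rw [if_pos hlt', pvS_append v hm_mem]
          simp only [List.length_append, List.length_singleton, Prod.mk.injEq, hc']
          refine ⟨by trivial, by push_cast; omega, by push_cast; omega⟩
        · rw [if_neg hlt', pvS_append v hm_mem, pvL_append_self]
          rw [hc'] at hub hlt'
          simp only [Prod.mk.injEq]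
          refine ⟨by trivial, by push_cast; omega, by push_cast at hub hlt' ⊢; omega⟩
      · rw [if_neg hvm]
        rw [if_neg (by rw [hmv_or hvm]; exact h0), if_pos (by rw [hmv_or hvm]; exact hlt)]
        rw [pvS_append v hm_mem, hmv_or hvm]
        simp only [List.length_append, List.length_singleton, Prod.mk.injEq]
        refine ⟨by trivial, by push_cast; omega, by trivial⟩
    · rw [if_neg hlt] at h
      subst h
      have hvm : ¬ v = m := by
        intro h'
        rw [hcnt, if_pos h'] at hub
        push_cast at hub hlt
        omega
      have hc' := hmv_or hvm
      have hstep : pvScanStep m ((q.idxOf m : Int), (pvL q m : Int), 0) ((q.length : Nat) : Int) v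
          = ((q.idxOf m : Int), (pvL q m : Int), 0) := by
        simp only [pvScanStep]
        rw [if_neg (by omega : ¬ ((q.idxOf m : Nat) : Int) = -1)]
        simp
      rw [hstep]
      rw [if_neg (by rw [hc']; exact h0), if_neg (by rw [hc']; exact hlt)]
      rw [pvS_append v hm_mem, pvL_append_ne hm_mem (fun h' => hvm h'.symm)]

lemma pvScan_foldl (M m : Int) (q : List Int) (hub : ((q.count m : Nat) : Int) ≤ M) :
    pvScanInv M m q ((PySem.List.enumerate q 0).foldl (fun st iv => pvScanStep m st iv.1 iv.2) (-1, -1, M)) := by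
  induction q using List.reverseRecOn with
  | nil => simp [PySem.List.enumerate_nil, pvScanInv]
  | append_singleton q v ih =>
    rw [PySem.List.enumerate_append, List.foldl_append]
    have hq : ((q.count m : Nat) : Int) ≤ M := by
      have h1 : q.count m ≤ (q ++ [v]).count m := by simp [List.count_append]
      push_cast at hub
      omega
    have hinv := ih hq
    simp only [PySem.List.enumerate_cons, PySem.List.enumerate_nil, List.foldl_cons, List.foldl_nil, zero_add]
    exact pvScan_step hinv hub

lemma pvScan_final (M m : Int) (p : List Int) (hc : ((p.count m : Nat) : Int) = M) (hM : 1 ≤ M) :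
    (PySem.List.enumerate p 0).foldl (fun st iv => pvScanStep m st iv.1 iv.2) (-1, -1, M)
      = ((pvS p m : Int), (pvL p m : Int), 0) := by
  have h := pvScan_foldl M m p (le_of_eq hc)
  unfold pvScanInv at h
  rw [if_neg (by omega : ¬ p.count m = 0), if_neg (by omega : ¬ ((p.count m : Nat) : Int) < M)] at h
  simpa [pvS] using h

-- ---- invariant of B's single recording pass ----

def pvInvB (q : List Int) (st : PySem.Dict Int Int × PySem.Dict Int Int × PySem.Dict Int Int) : Prop :=
  st.1 = PySem.Dict.counter q ∧
  (∀ v ∈ q, st.2.1.getD v 0 = ((q.idxOf v : Nat) : Int)) ∧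
  (∀ v ∈ q, st.2.2.getD v 0 = ((pvL q v : Nat) : Int))

lemma pvInvB_step {q : List Int} {st : PySem.Dict Int Int × PySem.Dict Int Int × PySem.Dict Int Int}
    (v : Int) (h : pvInvB q st) : pvInvB (q ++ [v]) (pvB1 st ((q.length : Nat) : Int) v) := by
  obtain ⟨cd, fd, ld⟩ := st
  obtain ⟨hc, hf, hl⟩ := h
  simp only at hc hf hl
  subst hc
  have hlast : ∀ w ∈ q ++ [v], (ld.insert v ((q.length : Nat) : Int)).getD w 0 = (((pvL (q ++ [v]) w : Nat)) : Int) := by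
    intro w hw
    by_cases hwv : w = v
    · subst hwv
      rw [PySem.Dict.getD_insert_self, pvL_append_self]
    · have hwq : w ∈ q := by
        rcases List.mem_append.mp hw with h | h
        · exact h
        · simp at h; exact absurd h hwv
      rw [PySem.Dict.getD_insert_of_ne _ _ _ hwv, pvL_append_ne hwq hwv]
      exact hl w hwq
  by_cases hvq : v ∈ q
  · have hcont : (PySem.Dict.counter q).contains v = true := by
      simp [PySem.Dict.contains_counter, hvq]
    have himpl : pvB1 (PySem.Dict.counter q, fd, ld) ((q.length : Nat) : Int) v
        = ((PySem.Dict.counter q).insert v ((PySem.Dict.counter q).getD v 0 + 1), fd, ld.insert v ((q.length : Nat) : Int)) := by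
      simp only [pvB1, hcont, if_true]
    rw [himpl]
    refine ⟨by rw [pv_counter_snoc], ?_, hlast⟩
    intro w hw
    have hwq : w ∈ q := by
      rcases List.mem_append.mp hw with h | h
      · exact h
      · simp at h; subst h; exact hvq
    rw [pvS_append v hwq]
    exact hf w hwq
  · have hcont : (PySem.Dict.counter q).contains v = false := by
      simp [PySem.Dict.contains_counter, hvq]
    have himpl : pvB1 (PySem.Dict.counter q, fd, ld) ((q.length : Nat) : Int) v
        = (((PySem.Dict.counter q).insert v 0).insert v (((PySem.Dict.counter q).insert v 0).getD v 0 + 1),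
            fd.insert v ((q.length : Nat) : Int), ld.insert v ((q.length : Nat) : Int)) := by
      simp only [pvB1, hcont, Bool.false_eq_true, if_false]
    rw [himpl]
    refine ⟨?_, ?_, hlast⟩
    · rw [PySem.Dict.getD_insert_self, PySem.Dict.insert_insert_self, pv_counter_snoc]
      rw [PySem.Dict.getD_counter]
      rw [List.count_eq_zero.mpr hvq]
      norm_num
    · intro w hw
      by_cases hwv : w = v
      · subst hwv
        rw [PySem.Dict.getD_insert_self, pvS_append_self hvq]
      · have hwq : w ∈ q := by
          rcases List.mem_append.mp hw with h | h
          · exact h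
          · simp at h; exact absurd h hwv
        rw [PySem.Dict.getD_insert_of_ne _ _ _ hwv, pvS_append v hwq]
        exact hf w hwq

lemma pvInvB_foldl (q : List Int) :
    pvInvB q ((PySem.List.enumerate q 0).foldl (fun st iv => pvB1 st iv.1 iv.2)
      (PySem.Dict.empty, PySem.Dict.empty, PySem.Dict.empty)) := by
  induction q using List.reverseRecOn with
  | nil =>
    refine ⟨rfl, ?_, ?_⟩ <;> intro v hv <;> simp at hv
  | append_singleton q v ih =>
    rw [PySem.List.enumerate_append, List.foldl_append]
    simp only [PySem.List.enumerate_cons, PySem.List.enumerate_nil, List.foldl_cons, List.foldl_nil, zero_add]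
    exact pvInvB_step v ih

-- B's maximum of the stored counts is the maximal count of the scanned prefix
lemma pvB_values_max (p : List Int) (hp : p ≠ []) :
    PySem.List.maxD (PySem.Dict.counter p).values (fun x => x) 0 = pvM p := by
  have hv : (PySem.Dict.counter p).values = (PySem.Set.ofList p).map (fun k => ((p.count k : Nat) : Int)) := by
    show (PySem.Dict.counter p).items.map (·.2) = _
    rw [PySem.Dict.items_counter, List.map_map]
    rfl
  obtain ⟨⟨x0, hx0, hx0e⟩, hubM⟩ := pvM_spec hp
  have hne : (PySem.Dict.counter p).values ≠ [] := by
    rw [hv]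
    simp only [ne_eq, List.map_eq_nil_iff]
    intro h
    have := (PySem.Set.mem_ofList p x0).mpr hx0
    rw [h] at this
    simp at this
  have hmaxD : PySem.List.maxD (PySem.Dict.counter p).values (fun x => x) 0
      = (PySem.List.max? (PySem.Dict.counter p).values (fun x => x)).getD 0 := rfl
  rcases hmax : PySem.List.max? (PySem.Dict.counter p).values (fun x => x) with _ | mk
  · rw [PySem.List.max?_eq_none_iff] at hmax; exact absurd hmax hne
  · have hmem := PySem.List.max?_mem hmax
    have hisMax := PySem.List.max?_isMax hmax
    rw [hv] at hmem
    rcases List.mem_map.mp hmem with ⟨x, hx, hxe⟩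
    have hxp : x ∈ p := (PySem.Set.mem_ofList p x).mp hx
    have h1 : mk ≤ pvM p := hxe ▸ hubM x hxp
    have h2 : pvM p ≤ mk := by
      have hmm : ((p.count x0 : Nat) : Int) ∈ (PySem.Dict.counter p).values := by
        rw [hv]
        exact List.mem_map.mpr ⟨x0, (PySem.Set.mem_ofList p x0).mpr hx0, rfl⟩
      have := hisMax _ hmm
      simp only at this
      omega
    rw [hmaxD, hmax]
    simp only [Option.getD_some]
    omega


-- ---- slices ----

lemma pv_slice_len (arr : List Int) (s l : Nat) (hsl : s ≤ l) (hl : l < arr.length) :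
    ((PySem.List.slice arr (some (s : Int)) (some ((l : Int) + 1))).length : Int) = (l : Int) - (s : Int) + 1 := by
  have h : ((l : Int) + 1) = ((l + 1 : Nat) : Int) := by push_cast; ring
  rw [h, PySem.List.slice_natCast]
  simp only [List.length_take, List.length_drop]
  push_cast
  omega

lemma pv_slice_full (arr : List Int) (s l : Nat) (h0 : s = 0) (h1 : l + 1 = arr.length) :
    PySem.List.slice arr (some (s : Int)) (some ((l : Int) + 1)) = arr := by
  subst h0
  have h : ((l : Int) + 1) = ((l + 1 : Nat) : Int) := by push_cast; ring
  rw [h, PySem.List.slice_natCast]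
  simp [h1]

-- ---- A's minimisation fold ----

def pvGA (arr p : List Int) (acc : List Int) (m : Int) : List Int :=
  if (pvL p m : Int) - (pvS p m : Int) + 1 < (acc.length : Int) then
    PySem.List.slice arr (some ((pvS p m : Nat) : Int)) (some ((pvL p m : Int) + 1))
  else acc

lemma pvGA_fold_pre (arr p : List Int) (hp : p.length ≤ arr.length) (u : Int) :
    ∀ L : List Int, (∀ x ∈ L, x ∈ p) → (∀ x ∈ L, pvSpan p u < pvSpan p x) →
    ∀ acc, pvSpan p u < (acc.length : Int) → pvSpan p u < ((L.foldl (pvGA arr p) acc).length : Int) := by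
  intro L
  induction L with
  | nil => intro _ _ acc h; simpa using h
  | cons x t ih =>
    intro hmem hgt acc hacc
    rw [List.foldl_cons]
    refine ih (fun y hy => hmem y (List.mem_cons_of_mem _ hy)) (fun y hy => hgt y (List.mem_cons_of_mem _ hy)) _ ?_
    have hx := hmem x List.mem_cons_self
    have hg := hgt x List.mem_cons_self
    unfold pvGA
    split_ifs with hlt
    · rw [pv_slice_len arr _ _ (pvS_le_pvL hx) (lt_of_lt_of_le (pvL_lt hx) hp)]
      unfold pvSpan at hg ⊢
      omega
    · exact hacc

lemma pvGA_fold_post (arr p : List Int) (u : Int) :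
    ∀ L : List Int, (∀ x ∈ L, pvSpan p u < pvSpan p x) →
    ∀ acc, (acc.length : Int) = pvSpan p u → L.foldl (pvGA arr p) acc = acc := by
  intro L
  induction L with
  | nil => intro _ acc _; rfl
  | cons x t ih =>
    intro hgt acc hacc
    rw [List.foldl_cons]
    have hg := hgt x List.mem_cons_self
    have hx : pvGA arr p acc x = acc := by
      unfold pvGA
      rw [if_neg (by unfold pvSpan at hg hacc; omega)]
    rw [hx]
    exact ih (fun y hy => hgt y (List.mem_cons_of_mem _ hy)) acc hacc

lemma pvGA_fold_main (arr p L : List Int) (u : Int) (hp : p.length ≤ arr.length)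
    (hnd : L.Nodup) (hu : u ∈ L) (hmem : ∀ x ∈ L, x ∈ p)
    (hstrict : ∀ x ∈ L, x ≠ u → pvSpan p u < pvSpan p x) :
    L.foldl (pvGA arr p) arr
      = PySem.List.slice arr (some ((pvS p u : Nat) : Int)) (some ((pvL p u : Int) + 1)) := by
  have hup : u ∈ p := hmem u hu
  have hsl := pvS_le_pvL hup
  have hll := lt_of_lt_of_le (pvL_lt hup) hp
  have hlen_slice : ((PySem.List.slice arr (some ((pvS p u : Nat) : Int)) (some ((pvL p u : Int) + 1))).length : Int)
      = pvSpan p u := by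
    rw [pv_slice_len arr _ _ hsl hll]; rfl
  by_cases hcase : pvSpan p u < (arr.length : Int)
  · obtain ⟨L1, L2, rfl⟩ := List.append_of_mem hu
    have hndr := List.Nodup.of_append_right hnd
    have hdisj := List.disjoint_of_nodup_append hnd
    have huL1 : u ∉ L1 := fun h => hdisj h List.mem_cons_self
    have huL2 : u ∉ L2 := by
      intro h
      exact (List.nodup_cons.mp hndr).1 h
    rw [List.foldl_append, List.foldl_cons]
    have hmem1 : ∀ x ∈ L1, x ∈ p := fun x hx => hmem x (by simp [hx])
    have hgt1 : ∀ x ∈ L1, pvSpan p u < pvSpan p x := by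
      intro x hx
      exact hstrict x (by simp [hx]) (fun h => huL1 (h ▸ hx))
    have hacc1 := pvGA_fold_pre arr p hp u L1 hmem1 hgt1 arr hcase
    have hmid : pvGA arr p (L1.foldl (pvGA arr p) arr) u
        = PySem.List.slice arr (some ((pvS p u : Nat) : Int)) (some ((pvL p u : Int) + 1)) := by
      have hcond := hacc1
      unfold pvSpan at hcond
      unfold pvGA at hcond ⊢
      rw [if_pos (by omega)]
    rw [hmid]
    refine pvGA_fold_post arr p u L2 ?_ _ hlen_slice
    intro x hx
    exact hstrict x (by simp [hx]) (fun h => huL2 (h ▸ hx))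
  · have hspan_le : pvSpan p u ≤ (arr.length : Int) := by unfold pvSpan; omega
    have heq : pvSpan p u = (arr.length : Int) := by omega
    have hLu : ∀ x ∈ L, x = u := by
      intro x hx
      by_contra hne
      have h1 := hstrict x hx hne
      have hxp := hmem x hx
      have h2 := pvS_le_pvL hxp
      have h3 := lt_of_lt_of_le (pvL_lt hxp) hp
      unfold pvSpan at h1 heq
      omega
    have hL : L = [u] := by
      cases L with
      | nil => simp at hu
      | cons a t =>
        have ha := hLu a List.mem_cons_self
        subst ha
        have ht : t = [] := by
          cases t with
          | nil => rfl
          | cons b t2 =>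
            have hb := hLu b (by simp)
            subst hb
            simp at hnd
        rw [ht]
    rw [hL, List.foldl_cons, List.foldl_nil]
    have hs0 : pvS p u = 0 := by unfold pvSpan at heq; omega
    have hl1 : pvL p u + 1 = arr.length := by unfold pvSpan at heq; omega
    unfold pvGA
    rw [if_neg (by unfold pvSpan at heq; omega)]
    exact (pv_slice_full arr (pvS p u) (pvL p u) hs0 hl1).symm

-- ---- B's minimisation fold ----

def pvHB (p : List Int) (best : Option (Int × Int)) (k : Int) : Option (Int × Int) :=
  if ((p.count k : Nat) : Int) = pvM p then
    match best with
    | none => some (((pvS p k : Nat) : Int), ((pvL p k : Nat) : Int))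
    | some b =>
      if ((pvL p k : Nat) : Int) - ((pvS p k : Nat) : Int) < b.2 - b.1 then
        some (((pvS p k : Nat) : Int), ((pvL p k : Nat) : Int))
      else some b
  else best

def pvPB (p : List Int) (u : Int) (best : Option (Int × Int)) : Prop :=
  best = none ∨ ∃ x, x ∈ p ∧ ((p.count x : Nat) : Int) = pvM p ∧ pvSpan p u < pvSpan p x ∧
    best = some (((pvS p x : Nat) : Int), ((pvL p x : Nat) : Int))

lemma pvHB_none (p : List Int) (k : Int) :
    pvHB p none k = if ((p.count k : Nat) : Int) = pvM p
      then some (((pvS p k : Nat) : Int), ((pvL p k : Nat) : Int)) else none := rfl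

lemma pvHB_some (p : List Int) (b : Int × Int) (k : Int) :
    pvHB p (some b) k = if ((p.count k : Nat) : Int) = pvM p
      then (if ((pvL p k : Nat) : Int) - ((pvS p k : Nat) : Int) < b.2 - b.1 then
        some (((pvS p k : Nat) : Int), ((pvL p k : Nat) : Int)) else some b)
      else some b := rfl

lemma pvHB_fold_pre (p : List Int) (u : Int) :
    ∀ L : List Int, (∀ x ∈ L, x ∈ p) →
    (∀ x ∈ L, ((p.count x : Nat) : Int) = pvM p → pvSpan p u < pvSpan p x) →
    ∀ best, pvPB p u best → pvPB p u (L.foldl (pvHB p) best) := by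
  intro L
  induction L with
  | nil => intro _ _ best h; exact h
  | cons x t ih =>
    intro hmem hgt best hbest
    rw [List.foldl_cons]
    refine ih (fun y hy => hmem y (List.mem_cons_of_mem _ hy)) (fun y hy => hgt y (List.mem_cons_of_mem _ hy)) _ ?_
    have hx := hmem x List.mem_cons_self
    rcases hbest with h | ⟨y, hy, hyM, hyg, h⟩ <;> subst h
    · rw [pvHB_none]
      by_cases hcM : ((p.count x : Nat) : Int) = pvM p
      · rw [if_pos hcM]
        exact Or.inr ⟨x, hx, hcM, hgt x List.mem_cons_self hcM, rfl⟩
      · rw [if_neg hcM]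
        exact Or.inl rfl
    · rw [pvHB_some]
      by_cases hcM : ((p.count x : Nat) : Int) = pvM p
      · rw [if_pos hcM]
        split_ifs with hcmp
        · exact Or.inr ⟨x, hx, hcM, hgt x List.mem_cons_self hcM, rfl⟩
        · exact Or.inr ⟨y, hy, hyM, hyg, rfl⟩
      · rw [if_neg hcM]
        exact Or.inr ⟨y, hy, hyM, hyg, rfl⟩

lemma pvHB_fold_post (p : List Int) (u : Int) :
    ∀ L : List Int,
    (∀ x ∈ L, ((p.count x : Nat) : Int) = pvM p → pvSpan p u < pvSpan p x) →
    L.foldl (pvHB p) (some (((pvS p u : Nat) : Int), ((pvL p u : Nat) : Int)))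
      = some (((pvS p u : Nat) : Int), ((pvL p u : Nat) : Int)) := by
  intro L
  induction L with
  | nil => intro _; rfl
  | cons x t ih =>
    intro hgt
    rw [List.foldl_cons]
    have hstep : pvHB p (some (((pvS p u : Nat) : Int), ((pvL p u : Nat) : Int))) x
        = some (((pvS p u : Nat) : Int), ((pvL p u : Nat) : Int)) := by
      rw [pvHB_some]
      by_cases hcM : ((p.count x : Nat) : Int) = pvM p
      · rw [if_pos hcM]
        have hg := hgt x List.mem_cons_self hcM
        have hneg : ¬ (((pvL p x : Nat) : Int) - ((pvS p x : Nat) : Int)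
            < (((pvS p u : Nat) : Int), ((pvL p u : Nat) : Int)).2 - (((pvS p u : Nat) : Int), ((pvL p u : Nat) : Int)).1) := by
          unfold pvSpan at hg
          simp
          omega
        rw [if_neg hneg]
      · rw [if_neg hcM]
    rw [hstep]
    exact ih (fun y hy => hgt y (List.mem_cons_of_mem _ hy))

lemma pvHB_fold_main (p L : List Int) (u : Int)
    (hnd : L.Nodup) (hu : u ∈ L) (hmem : ∀ x ∈ L, x ∈ p)
    (huM : ((p.count u : Nat) : Int) = pvM p)
    (hstrict : ∀ x ∈ L, ((p.count x : Nat) : Int) = pvM p → x ≠ u → pvSpan p u < pvSpan p x) :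
    L.foldl (pvHB p) none = some (((pvS p u : Nat) : Int), ((pvL p u : Nat) : Int)) := by
  obtain ⟨L1, L2, rfl⟩ := List.append_of_mem hu
  have hndr := List.Nodup.of_append_right hnd
  have hdisj := List.disjoint_of_nodup_append hnd
  have huL1 : u ∉ L1 := fun h => hdisj h List.mem_cons_self
  have huL2 : u ∉ L2 := fun h => (List.nodup_cons.mp hndr).1 h
  rw [List.foldl_append, List.foldl_cons]
  have hpre := pvHB_fold_pre p u L1 (fun x hx => hmem x (by simp [hx]))
    (fun x hx hxM => hstrict x (by simp [hx]) hxM (fun h => huL1 (h ▸ hx))) none (Or.inl rfl)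
  have hmid : pvHB p (L1.foldl (pvHB p) none) u
      = some (((pvS p u : Nat) : Int), ((pvL p u : Nat) : Int)) := by
    rcases hpre with h | ⟨y, hy, hyM, hyg, h⟩ <;> rw [h]
    · rw [pvHB_none, if_pos huM]
    · rw [pvHB_some, if_pos huM]
      have hpos : (((pvL p u : Nat) : Int) - ((pvS p u : Nat) : Int)
          < (((pvS p y : Nat) : Int), ((pvL p y : Nat) : Int)).2 - (((pvS p y : Nat) : Int), ((pvL p y : Nat) : Int)).1) := by
        unfold pvSpan at hyg
        simp
        omega
      rw [if_pos hpos]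
  rw [hmid]
  exact pvHB_fold_post p u L2
    (fun x hx hxM => hstrict x (by simp [hx]) hxM (fun h => huL2 (h ▸ hx)))


-- B's items fold, with the recorded first/last dictionaries abstracted
lemma pvB_fold_items (p : List Int) (fd ld : PySem.Dict Int Int) (u : Int)
    (hf : ∀ v ∈ p, fd.getD v 0 = ((p.idxOf v : Nat) : Int))
    (hl : ∀ v ∈ p, ld.getD v 0 = ((pvL p v : Nat) : Int))
    (hup : u ∈ p)
    (huM : ((p.count u : Nat) : Int) = pvM p)
    (hstrict : ∀ x : Int, ((p.count x : Nat) : Int) = pvM p → x ≠ u → pvSpan p u < pvSpan p x) :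
    (List.map (fun k => (k, ((List.count k p : Nat) : Int))) (PySem.Set.ofList p)).foldl
      (fun (best : Option (Int × Int)) pr =>
        if pr.2 = pvM p then
          match best with
          | none => some (fd.getD pr.1 0, ld.getD pr.1 0)
          | some b => if ld.getD pr.1 0 - fd.getD pr.1 0 < b.2 - b.1 then some (fd.getD pr.1 0, ld.getD pr.1 0) else best
        else best) none
    = some (((pvS p u : Nat) : Int), ((pvL p u : Nat) : Int)) := by
  rw [List.foldl_map]
  refine Eq.trans (PySem.List.foldl_congr_mem _ _ (pvHB p) none ?_)
    (pvHB_fold_main p (PySem.Set.ofList p) u (PySem.Set.nodup_ofList p)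
      ((PySem.Set.mem_ofList p u).mpr hup) (fun x hx => (PySem.Set.mem_ofList p x).mp hx) huM
      (fun x _ => hstrict x))
  intro acc k hk
  have hkp := (PySem.Set.mem_ofList p k).mp hk
  have hfk := hf k hkp
  have hlk := hl k hkp
  cases acc with
  | none => simp [pvHB_none, hfk, hlk, pvS]
  | some b => simp [pvHB_some, hfk, hlk, pvS]

-- ===== VERDICT (by name: the statement is the Claim_ definition above) =====
theorem specialSubarray_spec : Claim_equal_specialSubarray := by
  intro n arr _hdom hpre
  obtain ⟨hlen, htie⟩ := hpre
  show specialSubarray n arr = specialSubarray_alt n arr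
  rw [pvA_eq_impl, pvB_eq_impl]
  by_cases hn : 0 < n
  · have hn0 : (0:Int) ≤ n := le_of_lt hn
    have hplen : ((pvPrefix n arr).length : Int) = n := pvPrefix_length arr hn0 hlen
    set p := pvPrefix n arr with hpdef
    have hplen2 : p.length ≤ arr.length := (List.take_sublist _ _).length_le
    have hpne : p ≠ [] := by
      intro h
      rw [h] at hplen
      simp at hplen
      omega
    have hMpos := pvM_pos hpne
    have hloopA : (PySem.List.pyRange 0 n 1).foldl (fun st i => pvA1 st (PySem.List.pyGetD arr i 0)) pvAInit
        = p.foldl pvA1 pvAInit := by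
      rw [pv_foldl_enum n arr hn0 hlen (fun st _ v => pvA1 st v) pvAInit]
      exact pv_enum_snd_foldl p pvA1 pvAInit
    have hloopB : (PySem.List.pyRange 0 n 1).foldl (fun st i => pvB1 st i (PySem.List.pyGetD arr i 0))
          (PySem.Dict.empty, PySem.Dict.empty, PySem.Dict.empty)
        = (PySem.List.enumerate p 0).foldl (fun st iv => pvB1 st iv.1 iv.2)
            (PySem.Dict.empty, PySem.Dict.empty, PySem.Dict.empty) :=
      pv_foldl_enum n arr hn0 hlen (fun st i v => pvB1 st i v) _
    obtain ⟨hcounts, hfirst, hlast⟩ := pvInvB_foldl p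
    obtain ⟨-, -, hiff, hnds, -, -, -⟩ := pvInvA_foldl p
    simp only [pvAImpl, pvBImpl]
    rw [hloopA, hloopB, pvA_modefq p hpne, hcounts, pvB_values_max p hpne]
    by_cases hMone : pvM p = 1
    · simp [hMone]
    · rw [if_neg hMone, if_neg (by omega : ¬ pvM p = 0)]
      have hM2 : 2 ≤ pvM p := by omega
      have hmodes_mem : ∀ x : Int,
          x ∈ (p.foldl pvA1 pvAInit).1.getD (pvM p) PySem.Set.empty ↔ ((p.count x : Nat) : Int) = pvM p :=
        fun x => hiff (pvM p) (by omega) x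
      have hmodes_nd := hnds (pvM p)
      set modes := (p.foldl pvA1 pvAInit).1.getD (pvM p) PySem.Set.empty with hmodesdef
      obtain ⟨x0, hx0p, hx0M⟩ := (pvM_spec hpne).1
      have hx0modes : x0 ∈ modes := (hmodes_mem x0).mpr hx0M
      rcases hmin : PySem.List.min? modes (fun x => pvSpan p x) with _ | u
      · rw [PySem.List.min?_eq_none_iff] at hmin
        rw [hmin] at hx0modes
        simp at hx0modes
      · have humem := PySem.List.min?_mem hmin
        have humin := PySem.List.min?_isMin hmin
        have huM : ((p.count u : Nat) : Int) = pvM p := (hmodes_mem u).mp humem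
        have hup : u ∈ p := List.count_pos_iff.mp (by omega)
        have hstrict : ∀ x : Int, ((p.count x : Nat) : Int) = pvM p → x ≠ u → pvSpan p u < pvSpan p x := by
          intro x hxM hne
          have hxmodes : x ∈ modes := (hmodes_mem x).mpr hxM
          have hle := humin x hxmodes
          have hxp : x ∈ p := List.count_pos_iff.mp (by omega)
          have hspan_ne : pvSpan p u ≠ pvSpan p x := by
            intro h
            refine hne (htie hM2 u hup x hxp huM hxM h ?_).symm
            intro y hyp hyM
            exact humin y ((hmodes_mem y).mpr hyM)
          omega
        refine Eq.trans (PySem.List.foldl_congr_mem modes _ (pvGA arr p) arr ?_) ?_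
        · intro acc m_ hm_
          have hcM' : ((p.count m_ : Nat) : Int) = pvM p := (hmodes_mem m_).mp hm_
          have hscan : (PySem.List.pyRange 0 n 1).foldl
                (fun st i => pvScanStep m_ st i (PySem.List.pyGetD arr i 0)) (-1, -1, pvM p)
              = ((pvS p m_ : Int), (pvL p m_ : Int), 0) := by
            rw [pv_foldl_enum n arr hn0 hlen (fun st i v => pvScanStep m_ st i v) _]
            exact pvScan_final (pvM p) m_ p hcM' (by omega)
          rw [hscan]
          unfold pvGA
          rfl
        · rw [pvGA_fold_main arr p modes u hplen2 hmodes_nd humem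
            (fun x hx => List.count_pos_iff.mp (by have := (hmodes_mem x).mp hx; omega))
            (fun x hx hne => hstrict x ((hmodes_mem x).mp hx) hne)]
          rw [PySem.Dict.items_counter]
          rw [pvB_fold_items p _ _ u hfirst hlast hup huM hstrict, if_neg hMone]
  · have h1 : pvAImpl n arr = arr := by
      unfold pvAImpl
      rw [PySem.List.pyRange_one_eq_nil (by omega : n ≤ 0)]
      rfl
    have h2 : pvBImpl n arr = arr := by
      unfold pvBImpl
      rw [PySem.List.pyRange_one_eq_nil (by omega : n ≤ 0)]
      rfl
    rw [h1, h2]
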